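-- pv_equiv track=rewrite | github.com/Blossomyyh/leetcode | Robinhood.py | getSpecialSubstring
-- ===== SOURCE A (Python) =====
-- def normal(c, charValue):
--     if charValue[ord(c) - ord('a')] == '0':
--         return 1
--     return 0
--
-- def getSpecialSubstring(s, k, charValue):
--     left = 0
--     normalCount = 0
--     res = -1
--     for i, c in enumerate(s):
--         normalCount += normal(c, charValue)
--         if normalCount > k:
--             while normal(s[left], charValue) == 0:
--                 left += 1
--             left += 1
--             normalCount -= 1
--         res = max(i - left + 1, res)
--     return res
-- ===== SOURCE B (Python) =====
-- def normal(c, charValue):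
--     if charValue[ord(c) - ord('a')] == '0':
--         return 1
--     return 0
--
-- def getSpecialSubstring(s, k, charValue):
--     n = len(s)
--     pre = [0] * (n + 1)
--     for i, c in enumerate(s):
--         pre[i + 1] = pre[i] + normal(c, charValue)
--     res = -1
--     for i in range(n):
--         lo, hi = 0, i + 1
--         while lo < hi:
--             mid = (lo + hi) // 2
--             if pre[i + 1] - pre[mid] <= k:
--                 hi = mid
--             else:
--                 lo = mid + 1
--         res = max(res, i - lo + 1)
--     return res
-- ===== Notes on version B (the rewrite author's own statement) =====
-- stated objective: alternative
-- what changed: Replaces the sliding-window shrink with a running count by a precomputed prefix-count table plus, for each right end, a binary search for the leftmost valid window start.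
import Mathlib
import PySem

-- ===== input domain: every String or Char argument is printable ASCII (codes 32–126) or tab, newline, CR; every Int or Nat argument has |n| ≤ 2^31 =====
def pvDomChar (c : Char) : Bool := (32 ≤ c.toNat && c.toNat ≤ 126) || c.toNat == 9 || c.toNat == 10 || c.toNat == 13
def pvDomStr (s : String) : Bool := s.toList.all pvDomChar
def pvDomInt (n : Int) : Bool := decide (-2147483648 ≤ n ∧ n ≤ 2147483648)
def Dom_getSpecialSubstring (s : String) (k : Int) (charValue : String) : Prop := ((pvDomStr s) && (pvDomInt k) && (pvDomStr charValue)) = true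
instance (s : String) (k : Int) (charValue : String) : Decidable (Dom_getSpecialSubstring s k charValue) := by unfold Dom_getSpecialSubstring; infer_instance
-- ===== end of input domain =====

-- B replaces the sliding-window shrink by a prefix-count table plus, for each right end,
-- a binary search for the leftmost window start (objective: alternative algorithm; same O-class
-- of result, different traversal). Equivalence is about the return value; A mutates nothing.

-- ===== PORT A =====
-- normal(c, charValue): charValue[ord(c)-ord('a')] == '0' → 1 else 0.
-- On an out-of-range index Python raises IndexError (pyGet? = none); Pre_ excludes that,
-- the port returns 0 there.
def pvNormal (c : Char) (charValue : String) : Int :=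
  match PySem.Str.pyGet? charValue ((c.toNat : Int) - 97) with
  | some ch => if ch = '0' then 1 else 0
  | none => 0

-- the inner `while normal(s[left], charValue) == 0: left += 1`, scanning the suffix s[left:].
-- Python raises IndexError when the scan runs off the end (excluded by Pre_); the port stops.
def pvScanA (charValue : String) : List Char → Nat → Nat
  | [], left => left
  | c :: rest, left => if pvNormal c charValue = 0 then pvScanA charValue rest (left + 1) else left

-- the `for i, c in enumerate(s)` loop with state (left, normalCount, res)
def pvLoopA (charValue : String) (l : List Char) (k : Int) :
    List Char → Nat → Nat → Int → Int → Int
  | [], _i, _left, _count, res => res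
  | c :: rest, i, left, count, res =>
    let count1 := count + pvNormal c charValue
    if count1 > k then
      let left1 := pvScanA charValue (l.drop left) left + 1
      pvLoopA charValue l k rest (i + 1) left1 (count1 - 1) (max ((i : Int) - (left1 : Int) + 1) res)
    else
      pvLoopA charValue l k rest (i + 1) left count1 (max ((i : Int) - (left : Int) + 1) res)

def getSpecialSubstring (s : String) (k : Int) (charValue : String) : Int :=
  pvLoopA charValue s.toList k s.toList 0 0 0 (-1)

-- ===== PORT B =====
-- pre[i+1] = pre[i] + normal(s[i], charValue): the tail of the prefix-count table
def pvPreAux (charValue : String) (acc : Int) : List Char → List Int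
  | [] => []
  | c :: rest =>
    let v := acc + pvNormal c charValue
    v :: pvPreAux charValue v rest

-- binary search: smallest lo in [lo, hi] with pre[t] - pre[lo] <= k (t = i+1).
-- Python's pre[mid]/pre[t] lookups are always in range here; getD 0 is exact on that domain.
def pvBS (pre : List Int) (t : Nat) (k : Int) (lo hi : Nat) : Nat :=
  if h : lo < hi then
    let mid := (lo + hi) / 2
    if pre.getD t 0 - pre.getD mid 0 ≤ k then pvBS pre t k lo mid
    else pvBS pre t k (mid + 1) hi
  else lo
termination_by hi - lo
decreasing_by
  · have : (lo + hi) / 2 < hi := Nat.div_lt_of_lt_mul (by omega)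
    omega
  · have : lo ≤ (lo + hi) / 2 := Nat.le_div_iff_mul_le (by omega) |>.mpr (by omega)
    omega

-- the `for i in range(n)` loop, fuel = number of remaining indices
def pvLoopB (pre : List Int) (k : Int) : Nat → Nat → Int → Int
  | 0, _i, res => res
  | fuel + 1, i, res =>
    let lo := pvBS pre (i + 1) k 0 (i + 1)
    pvLoopB pre k fuel (i + 1) (max res ((i : Int) - (lo : Int) + 1))

def getSpecialSubstring_alt (s : String) (k : Int) (charValue : String) : Int :=
  let l := s.toList
  let pre : List Int := 0 :: pvPreAux charValue 0 l
  pvLoopB pre k l.length 0 (-1)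

-- ===== PRECONDITION & SPEC =====
-- Pre_ excludes exactly the inputs on which Python A raises IndexError: a character whose
-- charValue lookup is out of range, or k < 0 with some character of s not 'normal'
-- (then the shrink scan eventually runs past the end of s).
def Pre_getSpecialSubstring (s : String) (k : Int) (charValue : String) : Prop :=
  (s.toList.all (fun c => decide (PySem.Raise.InRange charValue.length ((c.toNat : Int) - 97))) = true) ∧
  (0 ≤ k ∨ s.toList.all (fun c => decide (PySem.Str.pyGet? charValue ((c.toNat : Int) - 97) = some '0')) = true)

instance (s : String) (k : Int) (charValue : String) : Decidable (Pre_getSpecialSubstring s k charValue) := by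
  unfold Pre_getSpecialSubstring; infer_instance

def pvWitness_getSpecialSubstring : String × Int × String := ("ab", 1, "01")

def Spec_getSpecialSubstring (s : String) (k : Int) (charValue : String) (out : Int) : Prop := out = getSpecialSubstring_alt s k charValue
instance (s : String) (k : Int) (charValue : String) (out : Int) : Decidable (Spec_getSpecialSubstring s k charValue out) := by unfold Spec_getSpecialSubstring; infer_instance

-- ===== CLAIM (what is proved, stated in full; the proofs are below) =====
def Claim_equal_getSpecialSubstring : Prop := ∀ (s : String) (k : Int) (charValue : String), Dom_getSpecialSubstring s k charValue → Pre_getSpecialSubstring s k charValue → Spec_getSpecialSubstring s k charValue (getSpecialSubstring s k charValue)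


-- ===== LEMMAS AND PROOFS =====

-- number of normal characters among the first j characters of l
def pvCnt (charValue : String) (l : List Char) (j : Nat) : Int :=
  ((l.take j).map (fun c => pvNormal c charValue)).sum

-- linear search: first index ≥ cur satisfying p, up to cur+fuel (returns cur+fuel if none)
def pvFirst (p : Nat → Bool) : Nat → Nat → Nat
  | cur, 0 => cur
  | cur, fuel + 1 => if p cur then cur else pvFirst p (cur + 1) fuel

-- the leftmost window start for right end t-1: least j ≤ t with cnt t - cnt j ≤ k (t if none)
def pvF (charValue : String) (l : List Char) (k : Int) (t : Nat) : Nat :=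
  pvFirst (fun j => decide (pvCnt charValue l t - pvCnt charValue l j ≤ k)) 0 t

-- the common result of both loops, folded from position t with `fuel` steps left
def pvSpecFrom (charValue : String) (l : List Char) (k : Int) : Nat → Nat → Int → Int
  | 0, _t, res => res
  | fuel + 1, t, res =>
    pvSpecFrom charValue l k fuel (t + 1)
      (max ((t : Int) - (pvF charValue l k (t + 1) : Int) + 1) res)

theorem pvNormal_cases (c : Char) (cv : String) : pvNormal c cv = 0 ∨ pvNormal c cv = 1 := by
  unfold pvNormal
  rcases PySem.Str.pyGet? cv ((c.toNat : Int) - 97) with _ | ch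
  · left; rfl
  · by_cases h : ch = '0' <;> simp [h]

theorem pvCnt_succ (cv : String) (l : List Char) (j : Nat) (h : j < l.length) :
    pvCnt cv l (j + 1) = pvCnt cv l j + pvNormal l[j] cv := by
  unfold pvCnt
  rw [List.map_take, List.map_take, List.take_add_one, List.getElem?_map,
    List.getElem?_eq_getElem h]
  simp

theorem pvCnt_mono (cv : String) (l : List Char) {a b : Nat} (h : a ≤ b) :
    pvCnt cv l a ≤ pvCnt cv l b := by
  induction b, h using Nat.le_induction with
  | base => exact le_refl _
  | succ b hab ih =>
    refine le_trans ih ?_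
    unfold pvCnt
    rw [List.take_add_one]
    cases hcase : l[b]? with
    | none => simp
    | some c =>
      simp
      rcases pvNormal_cases c cv with h0 | h1 <;> omega

theorem pvCnt_congr_zero (cv : String) (l : List Char) {a b : Nat} (h : a ≤ b)
    (hz : ∀ j, a ≤ j → j < b → ∀ hj : j < l.length, pvNormal l[j] cv = 0) :
    pvCnt cv l b = pvCnt cv l a := by
  induction b, h using Nat.le_induction with
  | base => rfl
  | succ b hab ih =>
    have hb : pvCnt cv l (b + 1) = pvCnt cv l b := by
      by_cases hlen : b < l.length
      · rw [pvCnt_succ cv l b hlen, hz b hab (by omega) hlen]; ring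
      · unfold pvCnt
        rw [List.take_add_one, List.getElem?_eq_none (by omega)]
        simp
    rw [hb]; exact ih (fun j hj1 hj2 hj3 => hz j hj1 (by omega) hj3)

theorem pvFirst_eq (p : Nat → Bool) (m : Nat) :
    ∀ fuel cur, cur ≤ m → m ≤ cur + fuel →
    (∀ j, cur ≤ j → j < m → p j = false) →
    (m < cur + fuel → p m = true) →
    pvFirst p cur fuel = m := by
  intro fuel
  induction fuel with
  | zero => intro cur h1 h2 _ _; unfold pvFirst; omega
  | succ fuel ih =>
    intro cur h1 h2 hfalse htrue
    unfold pvFirst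
    by_cases hp : p cur = true
    · have : m = cur := by
        by_contra hne
        have : p cur = false := hfalse cur (le_refl _) (by omega)
        simp [this] at hp
      simp [hp, this]
    · simp [hp]
      have hmne : m ≠ cur := by
        intro he
        exact hp (he ▸ htrue (by omega))
      exact ih (cur + 1) (by omega) (by omega)
        (fun j hj1 hj2 => hfalse j (by omega) hj2) (fun h => htrue (by omega))

theorem pvFirst_le (p : Nat → Bool) : ∀ fuel cur, pvFirst p cur fuel ≤ cur + fuel := by
  intro fuel
  induction fuel with
  | zero => intro cur; unfold pvFirst; omega
  | succ fuel ih =>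
    intro cur
    unfold pvFirst
    by_cases hp : p cur = true
    · simp [hp]
    · simp [hp]; have := ih (cur + 1); omega

theorem pvFirst_min (p : Nat → Bool) :
    ∀ fuel cur j, cur ≤ j → j < pvFirst p cur fuel → p j = false := by
  intro fuel
  induction fuel with
  | zero => intro cur j h1 h2; unfold pvFirst at h2; omega
  | succ fuel ih =>
    intro cur j h1 h2
    unfold pvFirst at h2
    by_cases hp : p cur = true
    · simp [hp] at h2; omega
    · simp [hp] at h2
      by_cases hj : j = cur
      · subst hj; simpa using hp
      · exact ih (cur + 1) j (by omega) h2

theorem pvFirst_sat (p : Nat → Bool) :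
    ∀ fuel cur, pvFirst p cur fuel < cur + fuel → p (pvFirst p cur fuel) = true := by
  intro fuel
  induction fuel with
  | zero => intro cur h; unfold pvFirst at h; omega
  | succ fuel ih =>
    intro cur h
    unfold pvFirst at h ⊢
    by_cases hp : p cur = true
    · simp [hp]
    · simp [hp] at h ⊢
      exact ih (cur + 1) (by omega)

-- scan lemma: pvScanA from `left` stops at the first normal index, given one exists at m
theorem pvScanA_first (cv : String) (l : List Char) :
    ∀ d m left (hm : left ≤ m) (hmlen : m < l.length), pvNormal l[m] cv = 1 →
    d = m - left →
    ∃ r, pvScanA cv (l.drop left) left = r ∧ left ≤ r ∧ r ≤ m ∧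
      (∀ hr : r < l.length, pvNormal l[r] cv = 1) ∧
      (∀ j, left ≤ j → j < r → ∀ hj : j < l.length, pvNormal l[j] cv = 0) := by
  intro d
  induction d with
  | zero =>
    intro m left hm hmlen hnorm hd
    have hlm : left = m := by omega
    subst hlm
    rw [List.drop_eq_getElem_cons hmlen]
    unfold pvScanA
    rw [hnorm]
    refine ⟨left, by norm_num, le_refl _, le_refl _, fun _ => hnorm, fun j h1 h2 _ => by omega⟩
  | succ d ih =>
    intro m left hm hmlen hnorm hd
    have hlt : left < m := by omega
    have hlen : left < l.length := by omega
    rw [List.drop_eq_getElem_cons hlen]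
    unfold pvScanA
    by_cases h0 : pvNormal l[left] cv = 0
    · rw [h0]
      obtain ⟨r, hr1, hr2, hr3, hr4, hr5⟩ := ih m (left + 1) (by omega) hmlen hnorm (by omega)
      refine ⟨r, hr1, by omega, hr3, hr4, ?_⟩
      intro j h1 h2 hj
      by_cases hje : j = left
      · subst hje; exact h0
      · exact hr5 j (by omega) h2 hj
    · rw [if_neg h0]
      have h1 : pvNormal l[left] cv = 1 := by
        rcases pvNormal_cases l[left] cv with h | h
        · exact absurd h h0
        · exact h
      exact ⟨left, rfl, le_refl _, by omega, fun _ => h1, fun j hj1 hj2 _ => by omega⟩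

-- prefix table lookup = pvCnt
theorem pvPreAux_getD (cv : String) :
    ∀ (l : List Char) (acc : Int) (j : Nat), j < l.length →
    (pvPreAux cv acc l).getD j 0 = acc + pvCnt cv l (j + 1) := by
  intro l
  induction l with
  | nil => intro acc j h; simp at h
  | cons c rest ih =>
    intro acc j h
    unfold pvPreAux
    cases j with
    | zero =>
      simp [pvCnt]
    | succ j =>
      simp only [List.getD_cons_succ]
      rw [ih (acc + pvNormal c cv) j (by simpa using h)]
      have : pvCnt cv (c :: rest) (j + 1 + 1) = pvNormal c cv + pvCnt cv rest (j + 1) := by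
        unfold pvCnt
        rw [List.take_succ_cons]
        simp
      rw [this]; ring

theorem pvPre_getD (cv : String) (l : List Char) :
    ∀ j, j ≤ l.length → ((0 : Int) :: pvPreAux cv 0 l).getD j 0 = pvCnt cv l j := by
  intro j hj
  cases j with
  | zero => simp [pvCnt]
  | succ j =>
    simp only [List.getD_cons_succ]
    rw [pvPreAux_getD cv l 0 j (by omega)]
    ring

-- the predicate searched for is monotone in j
theorem pvP_mono (cv : String) (l : List Char) (k : Int) (t : Nat) {a b : Nat} (h : a ≤ b)
    (ha : pvCnt cv l t - pvCnt cv l a ≤ k) : pvCnt cv l t - pvCnt cv l b ≤ k := by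
  have := pvCnt_mono cv l h
  omega

-- basic facts about pvF
theorem pvF_le (cv : String) (l : List Char) (k : Int) (t : Nat) : pvF cv l k t ≤ t := by
  have := pvFirst_le (fun j => decide (pvCnt cv l t - pvCnt cv l j ≤ k)) t 0
  unfold pvF
  omega

theorem pvF_min (cv : String) (l : List Char) (k : Int) (t : Nat) :
    ∀ j, j < pvF cv l k t → ¬ (pvCnt cv l t - pvCnt cv l j ≤ k) := by
  intro j hj
  have := pvFirst_min (fun j => decide (pvCnt cv l t - pvCnt cv l j ≤ k)) t 0 j (by omega)
    (by unfold pvF at hj; exact hj)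
  simpa using this

theorem pvF_sat (cv : String) (l : List Char) (k : Int) (t : Nat) (h : pvF cv l k t < t) :
    pvCnt cv l t - pvCnt cv l (pvF cv l k t) ≤ k := by
  have := pvFirst_sat (fun j => decide (pvCnt cv l t - pvCnt cv l j ≤ k)) t 0
    (by unfold pvF at h; omega)
  simpa [pvF] using this

-- pvF is the unique point with these properties
theorem pvF_eq (cv : String) (l : List Char) (k : Int) (t : Nat) (m : Nat) (hm : m ≤ t)
    (hmin : ∀ j, j < m → ¬ (pvCnt cv l t - pvCnt cv l j ≤ k))
    (hsat : m < t → pvCnt cv l t - pvCnt cv l m ≤ k) :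
    pvF cv l k t = m := by
  unfold pvF
  apply pvFirst_eq _ m t 0 (by omega) (by omega)
  · intro j _ hj
    simpa using hmin j hj
  · intro h
    simpa using hsat (by omega)

-- binary search computes pvF
theorem pvBS_eq (cv : String) (l : List Char) (k : Int) (t : Nat) (ht : t ≤ l.length) :
    ∀ n lo hi, n = hi - lo → lo ≤ pvF cv l k t → pvF cv l k t ≤ hi → hi ≤ t →
    pvBS (0 :: pvPreAux cv 0 l) t k lo hi = pvF cv l k t := by
  intro n
  induction n using Nat.strong_induction_on with
  | _ n ih =>
    intro lo hi hn h1 h2 h3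
    unfold pvBS
    by_cases hlh : lo < hi
    · rw [dif_pos hlh]
      have hmid1 : lo ≤ (lo + hi) / 2 := Nat.le_div_iff_mul_le (by omega) |>.mpr (by omega)
      have hmid2 : (lo + hi) / 2 < hi := Nat.div_lt_of_lt_mul (by omega)
      have hbr : (0 :: pvPreAux cv 0 l).getD t 0 - (0 :: pvPreAux cv 0 l).getD ((lo + hi) / 2) 0 =
          pvCnt cv l t - pvCnt cv l ((lo + hi) / 2) := by
        rw [pvPre_getD cv l t ht, pvPre_getD cv l ((lo + hi) / 2) (by omega)]
      by_cases hp : pvCnt cv l t - pvCnt cv l ((lo + hi) / 2) ≤ k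
      · rw [if_pos (by rw [hbr]; exact hp)]
        have hFle : pvF cv l k t ≤ (lo + hi) / 2 := by
          by_contra hgt
          exact pvF_min cv l k t ((lo + hi) / 2) (by omega) hp
        exact ih ((lo + hi) / 2 - lo) (by omega) lo ((lo + hi) / 2) rfl h1 hFle (by omega)
      · rw [if_neg (by rw [hbr]; exact hp)]
        have hFgt : (lo + hi) / 2 < pvF cv l k t := by
          by_contra hle
          push Not at hle
          by_cases hFt : pvF cv l k t < t
          · exact hp (pvP_mono cv l k t hle (pvF_sat cv l k t hFt))
          · have := pvF_le cv l k t
            omega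
        exact ih (hi - ((lo + hi) / 2 + 1)) (by omega) ((lo + hi) / 2 + 1) hi rfl
          (by omega) h2 h3
    · rw [dif_neg hlh]
      omega

-- a positive window count forces a normal character inside the window
theorem pvExists_normal (cv : String) (l : List Char) {a b : Nat} (hab : a ≤ b)
    (hb : b ≤ l.length) (h1 : 1 ≤ pvCnt cv l b - pvCnt cv l a) :
    ∃ m, a ≤ m ∧ m < b ∧ ∃ hm : m < l.length, pvNormal l[m] cv = 1 := by
  by_contra hno
  push Not at hno
  have hz : ∀ j, a ≤ j → j < b → ∀ hj : j < l.length, pvNormal l[j] cv = 0 := by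
    intro j hj1 hj2 hj3
    rcases pvNormal_cases l[j] cv with h | h
    · exact h
    · exact absurd h (hno j hj1 hj2 hj3)
  have := pvCnt_congr_zero cv l hab hz
  omega

-- A-side, k ≥ 0: loop invariant left = pvF t, count = cnt t - cnt left ≤ k
theorem pvLoopA_pos (cv : String) (l : List Char) (k : Int) (hk : 0 ≤ k) :
    ∀ rest t left res, l.drop t = rest → left ≤ t →
    (∀ j, j < left → ¬ (pvCnt cv l t - pvCnt cv l j ≤ k)) →
    pvCnt cv l t - pvCnt cv l left ≤ k →
    pvLoopA cv l k rest t left (pvCnt cv l t - pvCnt cv l left) res =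
      pvSpecFrom cv l k rest.length t res := by
  intro rest
  induction rest with
  | nil => intro t left res _ _ _ _; rfl
  | cons c rest ih =>
    intro t left res hdrop hlt hmin hsat
    have htlen : t < l.length := by
      by_contra h
      rw [List.drop_eq_nil_of_le (by omega)] at hdrop
      exact List.cons_ne_nil c rest hdrop.symm
    rw [List.drop_eq_getElem_cons htlen] at hdrop
    have hc : c = l[t] := ((List.cons.injEq _ _ _ _ ▸ hdrop).1).symm
    have hdrop' : l.drop (t + 1) = rest := (List.cons.injEq _ _ _ _ ▸ hdrop).2
    have hcnt1 : pvCnt cv l t - pvCnt cv l left + pvNormal c cv =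
        pvCnt cv l (t + 1) - pvCnt cv l left := by
      rw [hc]
      have := pvCnt_succ cv l t htlen
      omega
    simp only [pvLoopA, List.length_cons]
    by_cases hbig : pvCnt cv l t - pvCnt cv l left + pvNormal c cv > k
    · rw [if_pos hbig]
      have hk1 : pvCnt cv l (t + 1) - pvCnt cv l left = k + 1 := by
        rcases pvNormal_cases c cv with h | h <;> omega
      obtain ⟨m, hm1, hm2, hmlen, hmnorm⟩ :=
        pvExists_normal cv l (show left ≤ t + 1 by omega) (by omega) (by omega)
      obtain ⟨r, hr1, hr2, hr3, hr4, hr5⟩ :=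
        pvScanA_first cv l (m - left) m left (by omega) hmlen hmnorm rfl
      have hrlen : r < l.length := by omega
      have hcr : pvCnt cv l r = pvCnt cv l left := pvCnt_congr_zero cv l hr2 hr5
      have hcr1 : pvCnt cv l (r + 1) = pvCnt cv l left + 1 := by
        rw [pvCnt_succ cv l r hrlen, hr4 hrlen, hcr]
      have hmin' : ∀ j, j < r + 1 → ¬ (pvCnt cv l (t + 1) - pvCnt cv l j ≤ k) := by
        intro j hj
        have := pvCnt_mono cv l (show j ≤ r by omega)
        omega
      have hsat' : pvCnt cv l (t + 1) - pvCnt cv l (r + 1) ≤ k := by omega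
      have hF : pvF cv l k (t + 1) = r + 1 :=
        pvF_eq cv l k (t + 1) (r + 1) (by omega) hmin' (fun _ => hsat')
      rw [hr1]
      have hcount : pvCnt cv l t - pvCnt cv l left + pvNormal c cv - 1 =
          pvCnt cv l (t + 1) - pvCnt cv l (r + 1) := by omega
      rw [hcount]
      rw [ih (t + 1) (r + 1) _ hdrop' (by omega) hmin' hsat']
      simp only [pvSpecFrom, hF]
    · rw [if_neg hbig]
      rw [hcnt1]
      have hmin' : ∀ j, j < left → ¬ (pvCnt cv l (t + 1) - pvCnt cv l j ≤ k) := by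
        intro j hj
        have h1 := hmin j hj
        have h2 := pvCnt_mono cv l (show t ≤ t + 1 by omega)
        omega
      have hsat' : pvCnt cv l (t + 1) - pvCnt cv l left ≤ k := by omega
      have hF : pvF cv l k (t + 1) = left :=
        pvF_eq cv l k (t + 1) left (by omega) hmin' (fun _ => hsat')
      rw [ih (t + 1) left _ hdrop' (by omega) hmin' hsat']
      simp only [pvSpecFrom, hF]

-- A-side, k < 0 and every character normal: left = t, count = 0 throughout
theorem pvLoopA_neg (cv : String) (l : List Char) (k : Int) (hk : k < 0)
    (hall : ∀ c ∈ l, pvNormal c cv = 1) :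
    ∀ rest t res, l.drop t = rest →
    pvLoopA cv l k rest t t 0 res = pvSpecFrom cv l k rest.length t res := by
  intro rest
  induction rest with
  | nil => intro t res _; rfl
  | cons c rest ih =>
    intro t res hdrop
    have htlen : t < l.length := by
      by_contra h
      rw [List.drop_eq_nil_of_le (by omega)] at hdrop
      exact List.cons_ne_nil c rest hdrop.symm
    have hdropc := hdrop
    rw [List.drop_eq_getElem_cons htlen] at hdropc
    have hc : c = l[t] := ((List.cons.injEq _ _ _ _ ▸ hdropc).1).symm
    have hdrop' : l.drop (t + 1) = rest := (List.cons.injEq _ _ _ _ ▸ hdropc).2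
    have hnc : pvNormal c cv = 1 := by
      rw [hc]; exact hall l[t] (l.getElem_mem htlen)
    simp only [pvLoopA, List.length_cons]
    rw [if_pos (by rw [hnc]; omega)]
    have hscan : pvScanA cv (l.drop t) t = t := by
      rw [List.drop_eq_getElem_cons htlen]
      unfold pvScanA
      rw [← hc, hnc]
      norm_num
    rw [hscan]
    have hF : pvF cv l k (t + 1) = t + 1 := by
      apply pvF_eq cv l k (t + 1) (t + 1) (le_refl _)
      · intro j hj
        have := pvCnt_mono cv l (show j ≤ t + 1 by omega)
        omega
      · omega
    have h0 : (0 : Int) + pvNormal c cv - 1 = 0 := by rw [hnc]; ring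
    rw [h0, ih (t + 1) _ hdrop']
    simp only [pvSpecFrom, hF]

-- B-side: the loop computes the same fold
theorem pvLoopB_eq (cv : String) (l : List Char) (k : Int) :
    ∀ fuel t res, t + fuel = l.length →
    pvLoopB (0 :: pvPreAux cv 0 l) k fuel t res = pvSpecFrom cv l k fuel t res := by
  intro fuel
  induction fuel with
  | zero => intro t res _; rfl
  | succ fuel ih =>
    intro t res hlen
    simp only [pvLoopB, pvSpecFrom]
    rw [pvBS_eq cv l k (t + 1) (by omega) (t + 1) 0 (t + 1) (by omega) (by omega)
      (pvF_le cv l k (t + 1)) (le_refl _)]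
    rw [ih (t + 1) _ (by omega)]
    rw [max_comm]

-- ===== VERDICT (by name: the statement is the Claim_ definition above) =====
theorem getSpecialSubstring_spec : Claim_equal_getSpecialSubstring := by
  intro s k cv _ hpre
  obtain ⟨_, hk⟩ := hpre
  unfold Spec_getSpecialSubstring
  simp only [getSpecialSubstring, getSpecialSubstring_alt]
  have hB := pvLoopB_eq cv s.toList k s.toList.length 0 (-1) (by omega)
  by_cases hk0 : 0 ≤ k
  · have hA := pvLoopA_pos cv s.toList k hk0 s.toList 0 0 (-1) rfl (le_refl _)
      (fun j hj => absurd hj (by omega)) (by simpa [pvCnt] using hk0)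
    exact hA.trans hB.symm
  · have hall : ∀ c ∈ s.toList, pvNormal c cv = 1 := by
      rcases hk with hk | hall
      · exact absurd hk hk0
      · intro c hc
        have hget := of_decide_eq_true (List.all_eq_true.mp hall c hc)
        have hget' : PySem.List.pyGet? cv.toList ((c.toNat : Int) - 97) = some '0' := by
          simpa [PySem.Str.pyGet?] using hget
        simp [pvNormal, PySem.Str.pyGet?, hget']
    have hA := pvLoopA_neg cv s.toList k (by omega) hall s.toList 0 (-1) rfl
    exact hA.trans hB.symm
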